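-- pv_equiv track=rewrite | github.com/FranckCHAMBON/ClasseVirtuelle | Term_NSI/devoirs/4-dm2/Corrigé/S7/E9.py | insertion_puzzle
-- ===== SOURCE A (Python) =====
-- def insertion_puzzle(petit_puzzle: list, grand_puzzle : list):
--     """ Regarde si l'on peut insérer le petit puzzle 4*4 dans les emplacements vides du grand puzzle
--     >>> insertion_puzzle([[0, 1, 1, 0], [0, 1, 1, 0], [1, 1, 1, 1], [0, 0, 1, 1]],[[1, 1, 1, 1, 1, 1, 1, 1, 1, 1], [1, 1, 1, 0, 1, 1, 1, 1, 1, 1], [1, 1, 0, 0, 1, 1, 1, 0, 0, 1], [1, 1, 0, 0, 1, 1, 1, 0, 0, 1], [1, 0, 0, 0, 0, 1, 1, 1, 0, 1], [1, 1, 0, 0, 0, 1, 1, 1, 1, 1], [1, 1, 1, 1, 0, 1, 1, 1, 1, 1], [1, 1, 0, 0, 1, 0, 0, 1, 1, 1], [1, 1, 1, 0, 1, 1, 0, 0, 1, 1], [1, 1, 1, 0, 1, 1, 1, 1, 1, 1]])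
--     1
--     """
--     def début_petit_puzzle(petit_puzzle:list) -> tuple:
--         """Renvoie les coordonnées de la première pièce du petit puzzle
--         >>> début_petit_puzzle([[0, 1, 1, 0], [0, 1, 1, 0], [1, 1, 1, 1], [0, 0, 1, 1]])
--         (0,1)
--         """
--         for y in range(4):
--             for x in range(4):
--                 if petit_puzzle[y][x] != 0:
--                     return (y,x)
--
--     début = début_petit_puzzle(petit_puzzle)
--
--
--     déplacements = []
--     def recherche_déplacement(petit_puzzle: list,déplacements:list,début:tuple):
--         """ Prend le positionnement de chaque piéce du puzzle par rapport à la première pièce et le met dans déplacements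
--         >>> recherche_déplacement([[0, 1, 1, 0], [0, 1, 1, 0], [1, 1, 1, 1], [0, 0, 1, 1]],[],(0,1))
--         """
--         y,x = début
--         for y_1 in range(4):
--             for x_1 in range(4):
--                 if petit_puzzle[y_1][x_1] != 0:
--                     déplacements.append((y_1-y,x_1-x))
--
--
--
--     # On affecte chaque déplacement du petit puzzle dans déplacement
--     recherche_déplacement(petit_puzzle,déplacements,début)
--
--     def est_possible(y : int, x:int) -> bool:
--         """ Regarde si le déplacement est possible
--         >>> est_possible(8,9)
--         True
--         >>> est_possible(10,2)
--         False
--         """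
--         return (0 <= x < 10) and (0 <= y < 10)
--
--     def recherche_emplacement(x:int, y:int, déplacements:list,grand_puzzle:list) -> int:
--         """ Recherche si il est possible d'insérer le petit puzzle dans le grand puzzle et renvoie 1 sinon 0
--         >>> recherche_emplacement(2,2,[(0, 1), (1, 0), (1, 1), (2, -1), (2, 0), (2, 1), (2, 2), (3, 1), (3, 2)],[[1, 1, 1, 1, 1, 1, 1, 1, 1, 1], [1, 1, 1, 0, 1, 1, 1, 1, 1, 1], [1, 1, 0, 0, 1, 1, 1, 0, 0, 1], [1, 1, 0, 0, 1, 1, 1, 0, 0, 1], [1, 0, 0, 0, 0, 1, 1, 1, 0, 1], [1, 1, 0, 0, 0, 1, 1, 1, 1, 1], [1, 1, 1, 1, 0, 1, 1, 1, 1, 1], [1, 1, 0, 0, 1, 0, 0, 1, 1, 1], [1, 1, 1, 0, 1, 1, 0, 0, 1, 1], [1, 1, 1, 0, 1, 1, 1, 1, 1, 1]])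
--         1
--         """
--         for déplacement_y,déplacement_x in déplacements:
--             if not(est_possible(y + déplacement_y, x+  déplacement_x)) or (grand_puzzle[y+déplacement_y][x+ déplacement_x] != 0):
--                 return 0
--         return 1
--
--     for y in range(10):
--         for x in range(10):
--             if grand_puzzle[y][x] != 1:
--                 insertion_possible = recherche_emplacement(x, y,déplacements,grand_puzzle)
--                 if insertion_possible == 1:
--                     return insertion_possible
--     return 0
-- ===== SOURCE B (Python) =====
-- def insertion_puzzle(petit_puzzle: list, grand_puzzle: list):
--     # Bitmask algorithm: encode each row as an int of bits, trim the small
--     # shape to its bounding box, then slide it with shifts; a placement is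
--     # valid iff every shifted row mask is a submask of the empty-cells mask.
--     small = [sum(1 << x for x in range(4) if petit_puzzle[y][x] != 0) for y in range(4)]
--     empty = [sum(1 << x for x in range(10) if grand_puzzle[y][x] == 0) for y in range(10)]
--     union = small[0] | small[1] | small[2] | small[3]
--     top = min(y for y in range(4) if small[y] != 0)      # ValueError if petit has no piece
--     bottom = max(y for y in range(4) if small[y] != 0)
--     left = min(x for x in range(4) if union >> x & 1)
--     right = max(x for x in range(4) if union >> x & 1)
--     rows = [m >> left for m in small[top:bottom + 1]]
--     for sy in range(10 - (bottom - top)):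
--         for sx in range(10 - (right - left)):
--             if all((m << sx) & empty[sy + i] == (m << sx) for i, m in enumerate(rows)):
--                 return 1
--     return 0
-- ===== Notes on version B (the rewrite author's own statement) =====
-- stated objective: alternative
-- what changed: B encodes each row as an integer bitmask, trims the small shape to its bounding box, and slides it over the grid testing one shift-and-AND submask check per row, instead of A's per-cell scan with helper functions, an explicit bounds test and a per-piece coordinate loop.
import Mathlib
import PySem

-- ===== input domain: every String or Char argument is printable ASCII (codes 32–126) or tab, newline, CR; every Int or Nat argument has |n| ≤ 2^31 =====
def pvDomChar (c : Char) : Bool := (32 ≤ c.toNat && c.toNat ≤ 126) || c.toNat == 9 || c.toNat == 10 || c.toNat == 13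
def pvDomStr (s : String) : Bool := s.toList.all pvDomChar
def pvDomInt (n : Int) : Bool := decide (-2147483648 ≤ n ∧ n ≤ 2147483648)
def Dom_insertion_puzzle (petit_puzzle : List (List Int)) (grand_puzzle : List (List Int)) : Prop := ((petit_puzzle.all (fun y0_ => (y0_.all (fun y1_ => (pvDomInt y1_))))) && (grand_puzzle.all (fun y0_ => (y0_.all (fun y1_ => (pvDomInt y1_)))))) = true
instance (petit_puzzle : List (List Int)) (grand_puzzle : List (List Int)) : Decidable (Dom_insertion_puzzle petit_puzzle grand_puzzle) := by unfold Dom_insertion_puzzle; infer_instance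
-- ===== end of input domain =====

-- B replaces A's coordinate-by-coordinate scan by a bitmask algorithm: rows become
-- bit masks, the small shape is trimmed to its bounding box, and a placement test
-- is one shift-and-AND submask check per row.

-- shared 2-d indexing helper: g[y][x]; the default 0 is only reached outside Pre_
def pvAt (g : List (List Int)) (y x : Int) : Int :=
  PySem.List.pyGetD (PySem.List.pyGetD g y []) x 0

-- ===== PORT A =====
-- début_petit_puzzle: first (y,x) with petit[y][x] != 0 (None → excluded by Pre_)
def pvDebut (petit : List (List Int)) : Option (Int × Int) :=
  (PySem.List.pyRange 0 4 1).findSome? fun y =>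
    (PySem.List.pyRange 0 4 1).findSome? fun x =>
      if pvAt petit y x != 0 then some (y, x) else none

-- recherche_déplacement: appends (y1-y, x1-x) for each piece
def pvDeplacements (petit : List (List Int)) (debut : Int × Int) : List (Int × Int) :=
  (PySem.List.pyRange 0 4 1).foldl (fun acc y1 =>
    (PySem.List.pyRange 0 4 1).foldl (fun acc2 x1 =>
      if pvAt petit y1 x1 != 0 then acc2 ++ [(y1 - debut.1, x1 - debut.2)] else acc2) acc) []

def pvEstPossible (y x : Int) : Bool := (0 ≤ x && x < 10) && (0 ≤ y && y < 10)

-- recherche_emplacement: returns 0 on the first failing déplacement, else 1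
def pvRechercheEmplacement (x y : Int) (deps : List (Int × Int)) (grand : List (List Int)) : Int :=
  if deps.all (fun d => pvEstPossible (y + d.1) (x + d.2) && pvAt grand (y + d.1) (x + d.2) == 0)
  then 1 else 0

def insertion_puzzle (petit_puzzle : List (List Int)) (grand_puzzle : List (List Int)) : Int :=
  match pvDebut petit_puzzle with
  | none => 0   -- Python raises TypeError here (début is None); excluded by Pre_
  | some debut =>
    let deps := pvDeplacements petit_puzzle debut
    if (PySem.List.pyRange 0 10 1).any (fun y =>
         (PySem.List.pyRange 0 10 1).any (fun x =>
           (!(pvAt grand_puzzle y x == 1)) &&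
           (pvRechercheEmplacement x y deps grand_puzzle == 1)))
    then 1 else 0

-- ===== PORT B =====
-- sum(1 << x for x in range(n) if p(x)); masks are nonnegative Python ints, ported as Nat (same values)
def pvMask (n : Nat) (p : Nat → Bool) : Nat :=
  (((List.range n).filter p).map (fun x => 1 <<< x)).sum

-- small = [sum(1 << x for x in range(4) if petit[y][x] != 0) for y in range(4)]
def pvSmall (petit : List (List Int)) : List Nat :=
  (List.range 4).map (fun (y : Nat) => pvMask 4 (fun x => pvAt petit (y : Int) (x : Int) != 0))

-- empty = [sum(1 << x for x in range(10) if grand[y][x] == 0) for y in range(10)]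
def pvEmptyMasks (grand : List (List Int)) : List Nat :=
  (List.range 10).map (fun (y : Nat) => pvMask 10 (fun x => pvAt grand (y : Int) (x : Int) == 0))

-- union = small[0] | small[1] | small[2] | small[3]
def pvUnion (small : List Nat) : Nat :=
  small.getD 0 0 ||| small.getD 1 0 ||| small.getD 2 0 ||| small.getD 3 0

def insertion_puzzle_alt (petit_puzzle : List (List Int)) (grand_puzzle : List (List Int)) : Int :=
  let small := pvSmall petit_puzzle
  let empty := pvEmptyMasks grand_puzzle
  let union := pvUnion small
  -- top/bottom = min/max row with a piece, left/right = min/max occupied bit of union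
  match PySem.List.min? ((List.range 4).filter (fun y => small.getD y 0 != 0)) (fun z => z),
        PySem.List.max? ((List.range 4).filter (fun y => small.getD y 0 != 0)) (fun z => z),
        PySem.List.min? ((List.range 4).filter (fun x => (union >>> x) &&& 1 != 0)) (fun z => z),
        PySem.List.max? ((List.range 4).filter (fun x => (union >>> x) &&& 1 != 0)) (fun z => z) with
  | some top, some bottom, some left, some right =>
    -- rows = [m >> left for m in small[top:bottom+1]]
    let rows := (PySem.List.slice small (some (top : Int)) (some ((bottom : Int) + 1))).map (fun m => m >>> left)
    if (List.range (10 - (bottom - top))).any (fun sy =>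
        (List.range (10 - (right - left))).any (fun sx =>
          (PySem.List.enumerate rows).all (fun im =>
            ((im.2 <<< sx) &&& PySem.List.pyGetD empty ((sy : Int) + im.1) 0) == im.2 <<< sx)))
    then 1 else 0
  | _, _, _, _ => 0   -- Python: min() raises ValueError (petit has no piece); excluded by Pre_

-- ===== PRECONDITION & SPEC =====
-- Pre_ excludes exactly the inputs on which the Python A raises: a petit/grand
-- too small for the fixed 4×4 / 10×10 index loops (IndexError), and an all-zero
-- petit (début is None, unpacking it raises TypeError).
def Pre_insertion_puzzle (petit_puzzle : List (List Int)) (grand_puzzle : List (List Int)) : Prop :=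
  4 ≤ petit_puzzle.length ∧ (∀ r ∈ petit_puzzle.take 4, 4 ≤ r.length) ∧
  10 ≤ grand_puzzle.length ∧ (∀ r ∈ grand_puzzle.take 10, 10 ≤ r.length) ∧
  (∃ r ∈ petit_puzzle.take 4, ∃ v ∈ r.take 4, v ≠ 0)
instance (petit_puzzle : List (List Int)) (grand_puzzle : List (List Int)) : Decidable (Pre_insertion_puzzle petit_puzzle grand_puzzle) := by unfold Pre_insertion_puzzle; infer_instance

def pvWitness_insertion_puzzle : List (List Int) × List (List Int) :=
  ([[0, 1, 1, 0], [0, 1, 1, 0], [1, 1, 1, 1], [0, 0, 1, 1]],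
   [[1, 1, 1, 1, 1, 1, 1, 1, 1, 1], [1, 1, 1, 0, 1, 1, 1, 1, 1, 1],
    [1, 1, 0, 0, 1, 1, 1, 0, 0, 1], [1, 1, 0, 0, 1, 1, 1, 0, 0, 1],
    [1, 0, 0, 0, 0, 1, 1, 1, 0, 1], [1, 1, 0, 0, 0, 1, 1, 1, 1, 1],
    [1, 1, 1, 1, 0, 1, 1, 1, 1, 1], [1, 1, 0, 0, 1, 0, 0, 1, 1, 1],
    [1, 1, 1, 0, 1, 1, 0, 0, 1, 1], [1, 1, 1, 0, 1, 1, 1, 1, 1, 1]])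

def Spec_insertion_puzzle (petit_puzzle : List (List Int)) (grand_puzzle : List (List Int)) (out : Int) : Prop := out = insertion_puzzle_alt petit_puzzle grand_puzzle
instance (petit_puzzle : List (List Int)) (grand_puzzle : List (List Int)) (out : Int) : Decidable (Spec_insertion_puzzle petit_puzzle grand_puzzle out) := by unfold Spec_insertion_puzzle; infer_instance

-- ===== CLAIM (what is proved, stated in full; the proofs are below) =====
def Claim_equal_insertion_puzzle : Prop := ∀ (petit_puzzle : List (List Int)) (grand_puzzle : List (List Int)), Dom_insertion_puzzle petit_puzzle grand_puzzle → Pre_insertion_puzzle petit_puzzle grand_puzzle → Spec_insertion_puzzle petit_puzzle grand_puzzle (insertion_puzzle petit_puzzle grand_puzzle)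

-- ===== LEMMAS AND PROOFS =====

-- the piece list both characterizations speak about (proof-only helper)
def pvPieces (petit : List (List Int)) : List (Int × Int) :=
  (PySem.List.pyRange 0 4 1).flatMap fun y =>
    (PySem.List.pyRange 0 4 1).filterMap fun x =>
      if pvAt petit y x != 0 then some (y, x) else none

-- "cell (y,x) of the big grid exists and is empty"
def pvEmp (g : List (List Int)) (y x : Int) : Prop :=
  0 ≤ y ∧ y < 10 ∧ 0 ≤ x ∧ x < 10 ∧ pvAt g y x = 0

-- the placement predicate both programs decide, in A's coordinates (anchor a,
-- pieces moved by a - p0) — p0 is the first piece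
def pvPropA (petit grand : List (List Int)) (p0 : Int × Int) : Prop :=
  ∃ a : Int × Int, ∀ q ∈ pvPieces petit, pvEmp grand (a.1 + q.1 - p0.1) (a.2 + q.2 - p0.2)

-- the same predicate in B's coordinates (bounding-box corner placed at (sy,sx))
def pvPropB (petit grand : List (List Int)) (top bottom left right : Nat) : Prop :=
  ∃ sy sx : Nat, sy + bottom ≤ 9 + top ∧ sx + right ≤ 9 + left ∧
    ∀ q ∈ pvPieces petit, pvEmp grand (q.1 - top + sy) (q.2 - left + sx)

theorem pv_mem_pieces (petit : List (List Int)) (q : Int × Int) :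
    q ∈ pvPieces petit ↔
      (0 ≤ q.1 ∧ q.1 < 4 ∧ 0 ≤ q.2 ∧ q.2 < 4 ∧ pvAt petit q.1 q.2 ≠ 0) := by
  unfold pvPieces
  simp only [List.mem_flatMap, List.mem_filterMap, PySem.List.mem_pyRange_one]
  constructor
  · rintro ⟨y, ⟨hy0, hy1⟩, x, ⟨hx0, hx1⟩, hif⟩
    by_cases h : (pvAt petit y x != 0) = true
    · rw [if_pos h] at hif
      cases hif
      exact ⟨hy0, hy1, hx0, hx1, by simpa using h⟩
    · rw [if_neg h] at hif; cases hif
  · rintro ⟨h1, h2, h3, h4, h5⟩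
    exact ⟨q.1, ⟨h1, h2⟩, q.2, ⟨h3, h4⟩, by simp [h5]⟩

-- ---- bits of pvMask ----
theorem pv_mask_succ (n : Nat) (p : Nat → Bool) :
    pvMask (n+1) p = pvMask n p + (if p n then 2 ^ n else 0) := by
  unfold pvMask
  rw [List.range_succ, List.filter_append]
  cases h : p n <;> simp [h, Nat.one_shiftLeft]

theorem pv_mask_lt (n : Nat) (p : Nat → Bool) : pvMask n p < 2 ^ n := by
  induction n with
  | zero => simp [pvMask]
  | succ n ih =>
    rw [pv_mask_succ, pow_succ]
    split <;> omega

theorem pv_mask_testBit (n : Nat) (p : Nat → Bool) (j : Nat) :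
    (pvMask n p).testBit j = (decide (j < n) && p j) := by
  induction n with
  | zero => simp [pvMask]
  | succ n ih =>
    rw [pv_mask_succ]
    by_cases hp : p n = true
    · rw [hp, if_pos rfl, Nat.add_comm]
      rcases lt_trichotomy j n with h | h | h
      · rw [Nat.testBit_two_pow_add_gt h, ih]
        simp [Nat.lt_succ_of_lt h]
        omega
      · subst h
        rw [Nat.testBit_two_pow_add_eq, Nat.testBit_lt_two_pow (pv_mask_lt j p)]
        simp [hp]
      · have hlt : 2 ^ n + pvMask n p < 2 ^ j := by
          have := pv_mask_lt n p
          have h2 : 2 ^ (n+1) ≤ 2 ^ j := Nat.pow_le_pow_right (by omega) h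
          have : 2 ^ n + pvMask n p < 2 ^ (n+1) := by rw [pow_succ]; omega
          omega
        rw [Nat.testBit_lt_two_pow hlt]
        simp; omega
    · simp only [Bool.not_eq_true] at hp
      rw [hp, if_neg (by simp), Nat.add_zero, ih]
      by_cases h : j = n
      · subst h; simp [hp]
      · by_cases h2 : j < n
        · simp [h2, Nat.lt_succ_of_lt h2]
        · simp [h2]; omega

-- submask as per-bit implication
theorem pv_submask_iff (a b : Nat) :
    (a &&& b = a) ↔ ∀ j, a.testBit j = true → b.testBit j = true := by
  constructor
  · intro h j hj
    rw [← h, Nat.testBit_and] at hj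
    exact (Bool.and_eq_true _ _ |>.mp hj).2
  · intro h
    apply Nat.eq_of_testBit_eq
    intro j
    rw [Nat.testBit_and]
    cases h2 : a.testBit j
    · simp
    · simp [h j h2]

-- getD of a mapped range
theorem pv_getD_map_range {α : Type} (n : Nat) (f : Nat → α) (y : Nat) (d : α) (h : y < n) :
    ((List.range n).map f).getD y d = f y := by
  rw [List.getD_eq_getElem?_getD]
  simp [h]

-- bits of the small-row masks are exactly the pieces
theorem pv_small_testBit (petit : List (List Int)) (y x : Nat) (hy : y < 4) :
    ((pvSmall petit).getD y 0).testBit x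
      = (decide (x < 4) && (pvAt petit (y : Int) (x : Int) != 0)) := by
  unfold pvSmall
  rw [pv_getD_map_range 4 _ y 0 hy, pv_mask_testBit]

-- bits of the empty-row masks are exactly the empty cells
theorem pv_empty_testBit (grand : List (List Int)) (y x : Nat) (hy : y < 10) :
    ((pvEmptyMasks grand).getD y 0).testBit x
      = (decide (x < 10) && (pvAt grand (y : Int) (x : Int) == 0)) := by
  unfold pvEmptyMasks
  rw [pv_getD_map_range 10 _ y 0 hy, pv_mask_testBit]

-- small-row mask nonzero ↔ the row holds a piece
theorem pv_row_occ (petit : List (List Int)) (y : Nat) (hy : y < 4) :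
    ((pvSmall petit).getD y 0 ≠ 0) ↔ ∃ x : Nat, x < 4 ∧ pvAt petit (y : Int) (x : Int) ≠ 0 := by
  constructor
  · intro h
    obtain ⟨j, hj⟩ := Nat.exists_testBit_of_ne_zero h
    rw [pv_small_testBit petit y j hy] at hj
    simp only [Bool.and_eq_true, decide_eq_true_eq, bne_iff_ne] at hj
    exact ⟨j, hj.1, hj.2⟩
  · rintro ⟨x, hx, hne⟩
    intro h0
    have := pv_small_testBit petit y x hy
    rw [h0] at this
    simp [hx, hne] at this

-- the wildcard branch of B is only reached when petit has no piece
theorem pv_filter_rows_ne_nil (petit : List (List Int)) (p0 : Int × Int)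
    (h : (pvPieces petit).head? = some p0) :
    (List.range 4).filter (fun y => (pvSmall petit).getD y 0 != 0) ≠ [] := by
  have hp0 : p0 ∈ pvPieces petit := List.mem_of_mem_head? (by rw [h]; rfl)
  rw [pv_mem_pieces] at hp0
  obtain ⟨h1, h2, h3, h4, h5⟩ := hp0
  intro hnil
  have hy : p0.1.toNat < 4 := by omega
  have hmem : p0.1.toNat ∈ (List.range 4).filter (fun y => (pvSmall petit).getD y 0 != 0) := by
    rw [List.mem_filter, List.mem_range]
    refine ⟨hy, ?_⟩
    rw [bne_iff_ne, pv_row_occ petit _ hy]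
    exact ⟨p0.2.toNat, by omega, by rw [Int.toNat_of_nonneg h1, Int.toNat_of_nonneg h3]; exact h5⟩
  rw [hnil] at hmem
  cases hmem


-- Python truthiness of `union >> x & 1` is the x-th bit
theorem pv_bit_cond (u x : Nat) : ((u >>> x) &&& 1 != 0) = u.testBit x := by
  rw [Nat.and_one_is_mod, Nat.testBit_eq_decide_div_mod_eq, ← Nat.shiftRight_eq_div_pow]
  rcases Nat.mod_two_eq_zero_or_one (u >>> x) with h|h <;> rw [h] <;> rfl

-- bits of the union of the four row masks are the occupied columns
theorem pv_union_testBit (petit : List (List Int)) (x : Nat) :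
    (pvUnion (pvSmall petit)).testBit x = true ↔
      (x < 4 ∧ ∃ y : Nat, y < 4 ∧ pvAt petit (y : Int) (x : Int) ≠ 0) := by
  unfold pvUnion
  rw [Nat.testBit_or, Nat.testBit_or, Nat.testBit_or,
    pv_small_testBit petit 0 x (by omega), pv_small_testBit petit 1 x (by omega),
    pv_small_testBit petit 2 x (by omega), pv_small_testBit petit 3 x (by omega)]
  by_cases hx : x < 4
  · simp only [hx, decide_true, Bool.true_and, Bool.or_eq_true, bne_iff_ne, ne_eq, true_and]
    constructor
    · rintro (((h|h)|h)|h)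
      · exact ⟨0, by omega, h⟩
      · exact ⟨1, by omega, h⟩
      · exact ⟨2, by omega, h⟩
      · exact ⟨3, by omega, h⟩
    · rintro ⟨y, hy, h⟩
      interval_cases y
      · exact Or.inl (Or.inl (Or.inl h))
      · exact Or.inl (Or.inl (Or.inr h))
      · exact Or.inl (Or.inr h)
      · exact Or.inr h
  · simp [hx]

-- every piece's row index is in B's row filter
theorem pv_piece_row_mem (petit : List (List Int)) {q : Int × Int} (hq : q ∈ pvPieces petit) :
    q.1.toNat ∈ (List.range 4).filter (fun y => (pvSmall petit).getD y 0 != 0) := by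
  rw [pv_mem_pieces] at hq
  obtain ⟨h1, h2, h3, h4, h5⟩ := hq
  rw [List.mem_filter, List.mem_range]
  refine ⟨by omega, ?_⟩
  rw [bne_iff_ne, pv_row_occ petit _ (by omega)]
  exact ⟨q.2.toNat, by omega, by rw [Int.toNat_of_nonneg h1, Int.toNat_of_nonneg h3]; exact h5⟩

-- every piece's column index is in B's column filter
theorem pv_piece_col_mem (petit : List (List Int)) {q : Int × Int} (hq : q ∈ pvPieces petit) :
    q.2.toNat ∈ (List.range 4).filter (fun x => (((pvUnion (pvSmall petit)) >>> x) &&& 1 != 0)) := by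
  rw [pv_mem_pieces] at hq
  obtain ⟨h1, h2, h3, h4, h5⟩ := hq
  rw [List.mem_filter, List.mem_range]
  refine ⟨by omega, ?_⟩
  rw [pv_bit_cond, pv_union_testBit]
  exact ⟨by omega, q.1.toNat, by omega,
    by rw [Int.toNat_of_nonneg h1, Int.toNat_of_nonneg h3]; exact h5⟩

theorem pv_filter_cols_ne_nil (petit : List (List Int)) (p0 : Int × Int)
    (h : (pvPieces petit).head? = some p0) :
    (List.range 4).filter (fun x => (((pvUnion (pvSmall petit)) >>> x) &&& 1 != 0)) ≠ [] := by
  have hp0 : p0 ∈ pvPieces petit := List.mem_of_mem_head? (by rw [h]; rfl)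
  intro hnil
  have := pv_piece_col_mem petit hp0
  rw [hnil] at this
  cases this

-- min/max over the row filter: the extremal piece rows
theorem pv_rowMin (petit : List (List Int)) {top : Nat}
    (h : PySem.List.min? ((List.range 4).filter (fun y => (pvSmall petit).getD y 0 != 0)) (fun z => z) = some top) :
    top < 4 ∧ (∃ q ∈ pvPieces petit, q.1 = (top : Int)) ∧ (∀ q ∈ pvPieces petit, (top : Int) ≤ q.1) := by
  have hmem := PySem.List.min?_mem h
  rw [List.mem_filter, List.mem_range] at hmem
  obtain ⟨h4, hocc⟩ := hmem
  rw [bne_iff_ne, pv_row_occ petit _ h4] at hocc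
  obtain ⟨x, hx, hne⟩ := hocc
  refine ⟨h4, ⟨((top : Int), (x : Int)), ?_, rfl⟩, ?_⟩
  · rw [pv_mem_pieces]
    exact ⟨by simp, by simp; omega, by simp, by simp; omega, hne⟩
  · intro q hq
    have := PySem.List.min?_isMin h _ (pv_piece_row_mem petit hq)
    have hq1 : 0 ≤ q.1 := ((pv_mem_pieces petit q).mp hq).1
    omega

theorem pv_rowMax (petit : List (List Int)) {bottom : Nat}
    (h : PySem.List.max? ((List.range 4).filter (fun y => (pvSmall petit).getD y 0 != 0)) (fun z => z) = some bottom) :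
    bottom < 4 ∧ (∃ q ∈ pvPieces petit, q.1 = (bottom : Int)) ∧ (∀ q ∈ pvPieces petit, q.1 ≤ (bottom : Int)) := by
  have hmem := PySem.List.max?_mem h
  rw [List.mem_filter, List.mem_range] at hmem
  obtain ⟨h4, hocc⟩ := hmem
  rw [bne_iff_ne, pv_row_occ petit _ h4] at hocc
  obtain ⟨x, hx, hne⟩ := hocc
  refine ⟨h4, ⟨((bottom : Int), (x : Int)), ?_, rfl⟩, ?_⟩
  · rw [pv_mem_pieces]
    exact ⟨by simp, by simp; omega, by simp, by simp; omega, hne⟩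
  · intro q hq
    have := PySem.List.max?_isMax h _ (pv_piece_row_mem petit hq)
    have hq1 : 0 ≤ q.1 := ((pv_mem_pieces petit q).mp hq).1
    omega

theorem pv_colMin (petit : List (List Int)) {left : Nat}
    (h : PySem.List.min? ((List.range 4).filter (fun x => (((pvUnion (pvSmall petit)) >>> x) &&& 1 != 0))) (fun z => z) = some left) :
    left < 4 ∧ (∃ q ∈ pvPieces petit, q.2 = (left : Int)) ∧ (∀ q ∈ pvPieces petit, (left : Int) ≤ q.2) := by
  have hmem := PySem.List.min?_mem h
  rw [List.mem_filter, List.mem_range] at hmem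
  obtain ⟨h4, hocc⟩ := hmem
  rw [pv_bit_cond, pv_union_testBit] at hocc
  obtain ⟨_, y, hy, hne⟩ := hocc
  refine ⟨h4, ⟨((y : Int), (left : Int)), ?_, rfl⟩, ?_⟩
  · rw [pv_mem_pieces]
    exact ⟨by simp, by simp; omega, by simp, by simp; omega, hne⟩
  · intro q hq
    have := PySem.List.min?_isMin h _ (pv_piece_col_mem petit hq)
    have hq1 : 0 ≤ q.2 := ((pv_mem_pieces petit q).mp hq).2.2.1
    omega

theorem pv_colMax (petit : List (List Int)) {right : Nat}
    (h : PySem.List.max? ((List.range 4).filter (fun x => (((pvUnion (pvSmall petit)) >>> x) &&& 1 != 0))) (fun z => z) = some right) :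
    right < 4 ∧ (∃ q ∈ pvPieces petit, q.2 = (right : Int)) ∧ (∀ q ∈ pvPieces petit, q.2 ≤ (right : Int)) := by
  have hmem := PySem.List.max?_mem h
  rw [List.mem_filter, List.mem_range] at hmem
  obtain ⟨h4, hocc⟩ := hmem
  rw [pv_bit_cond, pv_union_testBit] at hocc
  obtain ⟨_, y, hy, hne⟩ := hocc
  refine ⟨h4, ⟨((y : Int), (right : Int)), ?_, rfl⟩, ?_⟩
  · rw [pv_mem_pieces]
    exact ⟨by simp, by simp; omega, by simp, by simp; omega, hne⟩
  · intro q hq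
    have := PySem.List.max?_isMax h _ (pv_piece_col_mem petit hq)
    have hq1 : 0 ≤ q.2 := ((pv_mem_pieces petit q).mp hq).2.2.1
    omega

-- the two coordinate systems describe the same placements
theorem pv_propA_iff_propB (petit grand : List (List Int)) (p0 : Int × Int)
    {top bottom left right : Nat}
    (htE : ∃ q ∈ pvPieces petit, q.1 = (top : Int))
    (hbE : ∃ q ∈ pvPieces petit, q.1 = (bottom : Int))
    (hlE : ∃ q ∈ pvPieces petit, q.2 = (left : Int))
    (hrE : ∃ q ∈ pvPieces petit, q.2 = (right : Int)) :
    pvPropA petit grand p0 ↔ pvPropB petit grand top bottom left right := by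
  constructor
  · rintro ⟨a, ha⟩
    obtain ⟨qt, hqt, hqt1⟩ := htE
    obtain ⟨qb, hqb, hqb1⟩ := hbE
    obtain ⟨ql, hql, hql1⟩ := hlE
    obtain ⟨qr, hqr, hqr1⟩ := hrE
    have Ht := ha qt hqt; have Hb := ha qb hqb
    have Hl := ha ql hql; have Hr := ha qr hqr
    unfold pvEmp at Ht Hb Hl Hr
    rw [hqt1] at Ht; rw [hqb1] at Hb; rw [hql1] at Hl; rw [hqr1] at Hr
    refine ⟨(a.1 + top - p0.1).toNat, (a.2 + left - p0.2).toNat, by omega, by omega, ?_⟩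
    intro q hq
    have harg1 : q.1 - (top : Int) + ((a.1 + top - p0.1).toNat : Int) = a.1 + q.1 - p0.1 := by omega
    have harg2 : q.2 - (left : Int) + ((a.2 + left - p0.2).toNat : Int) = a.2 + q.2 - p0.2 := by omega
    rw [harg1, harg2]
    exact ha q hq
  · rintro ⟨sy, sx, _, _, hall⟩
    refine ⟨(p0.1 - top + sy, p0.2 - left + sx), ?_⟩
    intro q hq
    have harg1 : (p0.1 - (top : Int) + (sy : Int)) + q.1 - p0.1 = q.1 - top + sy := by ring
    have harg2 : (p0.2 - (left : Int) + (sx : Int)) + q.2 - p0.2 = q.2 - left + sx := by ring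
    rw [harg1, harg2]
    exact hall q hq

-- ---- A-side bridges ----
theorem pv_findSome?_eq_head?_filterMap {α β : Type} (f : α → Option β) (l : List α) :
    l.findSome? f = (l.filterMap f).head? := by
  induction l with
  | nil => rfl
  | cons a l ih =>
    cases h : f a
    · simp only [List.findSome?_cons, List.filterMap_cons, h]; exact ih
    · simp only [List.findSome?_cons, List.filterMap_cons, h, List.head?_cons]

theorem pv_findSome?_head?_flatMap {α β : Type} (g : α → List β) (l : List α) :
    l.findSome? (fun a => (g a).head?) = (l.flatMap g).head? := by
  induction l with
  | nil => rfl
  | cons a l ih =>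
    simp only [List.findSome?_cons, List.flatMap_cons, List.head?_append]
    cases h : (g a).head? <;> simp_all

-- A's début is the head of the piece list
theorem pv_debut_eq_head (petit : List (List Int)) :
    pvDebut petit = (pvPieces petit).head? := by
  unfold pvDebut pvPieces
  rw [← pv_findSome?_head?_flatMap]
  simp only [pv_findSome?_eq_head?_filterMap]

theorem pv_filter_map_eq_filterMap {α β : Type} (p : α → Bool) (f : α → β) (l : List α) :
    (l.filter p).map f = l.filterMap (fun x => if p x then some (f x) else none) := by
  induction l with
  | nil => rfl
  | cons a l ih => cases h : p a <;> simp [h, ih]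

-- A's déplacements list is the piece list relative to the first piece
theorem pv_deps_eq_map (petit : List (List Int)) (p0 : Int × Int) :
    pvDeplacements petit p0
      = (pvPieces petit).map (fun q => (q.1 - p0.1, q.2 - p0.2)) := by
  unfold pvDeplacements pvPieces
  simp only [PySem.List.foldl_append_if]
  rw [PySem.List.foldl_append_eq_flatMap, List.map_flatMap]
  simp only [List.nil_append, List.map_filterMap]
  congr 1; funext y1
  rw [pv_filter_map_eq_filterMap]
  congr 1; funext x1
  by_cases h : (pvAt petit y1 x1 != 0) = true <;> simp [h]

-- A's inner helper returns 1 exactly on a feasible anchor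
theorem pv_recherche_eq_one (x y : Int) (deps : List (Int × Int)) (g : List (List Int)) :
    ((pvRechercheEmplacement x y deps g == 1) = true) ↔
      ∀ d ∈ deps, pvEstPossible (y + d.1) (x + d.2) = true ∧ pvAt g (y + d.1) (x + d.2) = 0 := by
  unfold pvRechercheEmplacement
  split <;> rename_i h <;> simp_all [List.all_eq_true]

theorem pv_est_possible_iff (y x : Int) :
    pvEstPossible y x = true ↔ 0 ≤ y ∧ y < 10 ∧ 0 ≤ x ∧ x < 10 := by
  simp [pvEstPossible]; omega

-- A's scan succeeds exactly on the placement predicate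
theorem pv_LA_iff (petit grand : List (List Int)) (p0 : Int × Int)
    (h : (pvPieces petit).head? = some p0) :
    (((PySem.List.pyRange 0 10 1).any (fun y =>
       (PySem.List.pyRange 0 10 1).any (fun x =>
         (!(pvAt grand y x == 1)) &&
         (pvRechercheEmplacement x y (pvDeplacements petit p0) grand == 1)))) = true)
    ↔ pvPropA petit grand p0 := by
  have hp0 : p0 ∈ pvPieces petit := List.mem_of_mem_head? (by rw [h]; rfl)
  simp only [List.any_eq_true, PySem.List.mem_pyRange_one, Bool.and_eq_true,
    pv_recherche_eq_one, pv_deps_eq_map, List.mem_map, Bool.not_eq_eq_eq_not,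
    Bool.not_true, beq_eq_false_iff_ne, ne_eq, pv_est_possible_iff]
  constructor
  · rintro ⟨y, ⟨hy0, hy1⟩, x, ⟨hx0, hx1⟩, _, hall⟩
    refine ⟨(y, x), ?_⟩
    intro q hq
    have hh : (0 ≤ y + (q.1 - p0.1) ∧ y + (q.1 - p0.1) < 10 ∧
        0 ≤ x + (q.2 - p0.2) ∧ x + (q.2 - p0.2) < 10) ∧
        pvAt grand (y + (q.1 - p0.1)) (x + (q.2 - p0.2)) = 0 := hall _ ⟨q, hq, rfl⟩
    obtain ⟨⟨b1, b2, b3, b4⟩, hz⟩ := hh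
    unfold pvEmp
    show 0 ≤ y + q.1 - p0.1 ∧ y + q.1 - p0.1 < 10 ∧ 0 ≤ x + q.2 - p0.2 ∧
        x + q.2 - p0.2 < 10 ∧ pvAt grand (y + q.1 - p0.1) (x + q.2 - p0.2) = 0
    rw [show y + (q.1 - p0.1) = y + q.1 - p0.1 from by ring,
        show x + (q.2 - p0.2) = x + q.2 - p0.2 from by ring] at hz
    exact ⟨by omega, by omega, by omega, by omega, hz⟩
  · rintro ⟨a, ha⟩
    have h00 := ha p0 hp0
    unfold pvEmp at h00
    have e1 : a.1 + p0.1 - p0.1 = a.1 := by ring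
    have e2 : a.2 + p0.2 - p0.2 = a.2 := by ring
    rw [e1, e2] at h00
    obtain ⟨c1, c2, c3, c4, c5⟩ := h00
    refine ⟨a.1, ⟨c1, c2⟩, a.2, ⟨c3, c4⟩, by rw [c5]; decide, ?_⟩
    rintro d ⟨q, hq, rfl⟩
    have hh := ha q hq
    unfold pvEmp at hh
    have e3 : a.1 + (q.1 - p0.1) = a.1 + q.1 - p0.1 := by ring
    have e4 : a.2 + (q.2 - p0.2) = a.2 + q.2 - p0.2 := by ring
    simp only [e3, e4]
    exact ⟨⟨hh.1, hh.2.1, hh.2.2.1, hh.2.2.2.1⟩, hh.2.2.2.2⟩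

-- B's sliding bitmask scan succeeds exactly on the placement predicate
theorem pv_LB_iff (petit grand : List (List Int)) {top bottom left right : Nat}
    (h4b : bottom < 4) (h4r : right < 4)
    (htb : top ≤ bottom) (hlr : left ≤ right)
    (htL : ∀ q ∈ pvPieces petit, (top : Int) ≤ q.1)
    (hbL : ∀ q ∈ pvPieces petit, q.1 ≤ (bottom : Int))
    (hlL : ∀ q ∈ pvPieces petit, (left : Int) ≤ q.2)
    (hrL : ∀ q ∈ pvPieces petit, q.2 ≤ (right : Int)) :
    (((List.range (10 - (bottom - top))).any (fun sy =>
      (List.range (10 - (right - left))).any (fun sx =>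
        (PySem.List.enumerate ((PySem.List.slice (pvSmall petit) (some (top : Int)) (some ((bottom : Int) + 1))).map (fun m => m >>> left))).all (fun im =>
          ((im.2 <<< sx) &&& PySem.List.pyGetD (pvEmptyMasks grand) ((sy : Int) + im.1) 0) == im.2 <<< sx)))) = true)
    ↔ pvPropB petit grand top bottom left right := by
  have hsl : PySem.List.slice (pvSmall petit) (some (top : Int)) (some ((bottom : Int) + 1))
      = List.take (bottom + 1 - top) (List.drop top (pvSmall petit)) := by
    rw [show ((bottom : Int) + 1) = ((bottom + 1 : Nat) : Int) from by push_cast; ring]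
    exact PySem.List.slice_natCast _ _ _
  have hlen_small : (pvSmall petit).length = 4 := by simp [pvSmall]
  have hlenR : ((List.take (bottom + 1 - top) (List.drop top (pvSmall petit))).map (fun m => m >>> left)).length = bottom + 1 - top := by
    simp [hlen_small]; omega
  have hgetR : ∀ (k : Nat) (hk : k < ((List.take (bottom + 1 - top) (List.drop top (pvSmall petit))).map (fun m => m >>> left)).length),
      ((List.take (bottom + 1 - top) (List.drop top (pvSmall petit))).map (fun m => m >>> left))[k]
        = ((pvSmall petit).getD (top + k) 0) >>> left := by
    intro k hk
    rw [hlenR] at hk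
    have h1 : top + k < (pvSmall petit).length := by omega
    rw [List.getElem_map, List.getElem_take, List.getElem_drop, List.getD_eq_getElem _ _ h1]
  simp only [hsl, List.any_eq_true, List.mem_range, List.all_eq_true,
    PySem.List.mem_enumerate_iff, beq_iff_eq]
  constructor
  · rintro ⟨sy, hsy, sx, hsx, hall⟩
    refine ⟨sy, sx, by omega, by omega, ?_⟩
    intro q hq
    obtain ⟨hq1, hq2, hq3, hq4, hq5⟩ := (pv_mem_pieces petit q).mp hq
    have ht := htL q hq; have hb := hbL q hq
    have hl := hlL q hq; have hr := hrL q hq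
    set k := (q.1 - (top : Int)).toNat with hk
    set c := (q.2 - (left : Int)).toNat with hc
    have hkR : k < ((List.take (bottom + 1 - top) (List.drop top (pvSmall petit))).map (fun m => m >>> left)).length := by
      rw [hlenR]; omega
    have h := hall _ ⟨k, hkR, rfl⟩
    rw [hgetR k hkR] at h
    rw [show (sy : Int) + (0 + (k : Int)) = ((sy + k : Nat) : Int) from by push_cast; ring,
      PySem.List.pyGetD_natCast] at h
    have hbit := (pv_submask_iff _ _).mp h (sx + c)
    rw [Nat.testBit_shiftLeft, Nat.testBit_shiftRight] at hbit
    have hsmall : (((pvSmall petit).getD (top + k) 0)).testBit (left + (sx + c - sx)) = true := by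
      rw [pv_small_testBit petit (top + k) _ (by omega)]
      simp only [Bool.and_eq_true, decide_eq_true_eq, bne_iff_ne, ne_eq]
      refine ⟨by omega, ?_⟩
      rw [show ((top + k : Nat) : Int) = q.1 from by omega,
        show ((left + (sx + c - sx) : Nat) : Int) = q.2 from by omega]
      exact hq5
    have harg : (decide (sx + c ≥ sx) && (((pvSmall petit).getD (top + k) 0)).testBit (left + (sx + c - sx))) = true := by
      rw [hsmall]; simp
    have hE := hbit harg
    rw [pv_empty_testBit grand (sy + k) (sx + c) (by omega)] at hE
    simp only [Bool.and_eq_true, decide_eq_true_eq, beq_iff_eq] at hE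
    obtain ⟨hE1, hE2⟩ := hE
    unfold pvEmp
    rw [show q.1 - (top : Int) + (sy : Int) = ((sy + k : Nat) : Int) from by omega,
      show q.2 - (left : Int) + (sx : Int) = ((sx + c : Nat) : Int) from by omega]
    exact ⟨by omega, by omega, by omega, by omega, hE2⟩
  · rintro ⟨sy, sx, hb1, hb2, hall⟩
    refine ⟨sy, by omega, sx, by omega, ?_⟩
    rintro im ⟨k, hkR, rfl⟩
    have hkb : k ≤ bottom - top := by
      have := hkR; rw [hlenR] at this; omega
    show ((((List.take (bottom + 1 - top) (List.drop top (pvSmall petit))).map (fun m => m >>> left))[k] <<< sx) &&&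
        PySem.List.pyGetD (pvEmptyMasks grand) ((sy : Int) + (0 + (k : Int))) 0)
      = ((List.take (bottom + 1 - top) (List.drop top (pvSmall petit))).map (fun m => m >>> left))[k] <<< sx
    rw [hgetR k hkR,
      show (sy : Int) + (0 + (k : Int)) = ((sy + k : Nat) : Int) from by push_cast; ring,
      PySem.List.pyGetD_natCast]
    apply (pv_submask_iff _ _).mpr
    intro j hj
    rw [Nat.testBit_shiftLeft, Nat.testBit_shiftRight] at hj
    simp only [Bool.and_eq_true, decide_eq_true_eq, ge_iff_le] at hj
    obtain ⟨hjs, hbitS⟩ := hj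
    rw [pv_small_testBit petit (top + k) _ (by omega)] at hbitS
    simp only [Bool.and_eq_true, decide_eq_true_eq, bne_iff_ne, ne_eq] at hbitS
    obtain ⟨hc4, hne⟩ := hbitS
    have hq : (((top + k : Nat) : Int), ((left + (j - sx) : Nat) : Int)) ∈ pvPieces petit := by
      rw [pv_mem_pieces]
      refine ⟨?_, ?_, ?_, ?_, hne⟩ <;> simp <;> omega
    have hEmp := hall _ hq
    unfold pvEmp at hEmp
    simp only at hEmp
    rw [show ((top + k : Nat) : Int) - (top : Int) + (sy : Int) = ((sy + k : Nat) : Int) from by push_cast; ring,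
      show ((left + (j - sx) : Nat) : Int) - (left : Int) + (sx : Int) = ((j : Nat) : Int) from by push_cast; omega] at hEmp
    obtain ⟨e1, e2, e3, e4, e5⟩ := hEmp
    rw [pv_empty_testBit grand (sy + k) j (by exact_mod_cast e2)]
    simp only [Bool.and_eq_true, decide_eq_true_eq, beq_iff_eq]
    exact ⟨by exact_mod_cast e4, e5⟩

-- the two programs agree (Pre_ only marks where the Python A returns)
theorem pv_main (p g : List (List Int)) :
    insertion_puzzle p g = insertion_puzzle_alt p g := by
  cases hh : (pvPieces p).head? with
  | none =>
    have hnil : pvPieces p = [] := List.head?_eq_none_iff.mp hh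
    have hfil : (List.range 4).filter (fun y => (pvSmall p).getD y 0 != 0) = [] := by
      rw [List.filter_eq_nil_iff]
      intro y hy
      rw [List.mem_range] at hy
      simp only [bne_iff_ne, ne_eq, Decidable.not_not]
      by_contra h0
      obtain ⟨x, hx, hne⟩ := (pv_row_occ p y hy).mp h0
      have : ((y : Int), (x : Int)) ∈ pvPieces p := by
        rw [pv_mem_pieces]
        refine ⟨?_, ?_, ?_, ?_, hne⟩ <;> simp <;> omega
      rw [hnil] at this
      cases this
    have hu : pvUnion (pvSmall p) = 0 := by
      apply Nat.eq_of_testBit_eq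
      intro j
      rw [Nat.zero_testBit]
      by_contra hbit
      rw [Bool.not_eq_false] at hbit
      obtain ⟨hj, y, hy, hne⟩ := (pv_union_testBit p j).mp hbit
      have : ((y : Int), (j : Int)) ∈ pvPieces p := by
        rw [pv_mem_pieces]
        refine ⟨?_, ?_, ?_, ?_, hne⟩ <;> simp <;> omega
      rw [hnil] at this
      cases this
    have hfilc : (List.range 4).filter (fun x => ((pvUnion (pvSmall p) >>> x) &&& 1 != 0)) = [] := by
      rw [hu]
      simp
    simp only [insertion_puzzle, pv_debut_eq_head, hh, insertion_puzzle_alt, hfil, hfilc]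
    rfl
  | some p0 =>
    obtain ⟨top, hmt⟩ : ∃ t, PySem.List.min? ((List.range 4).filter (fun y => (pvSmall p).getD y 0 != 0)) (fun z => z) = some t := by
      cases hcase : PySem.List.min? ((List.range 4).filter (fun y => (pvSmall p).getD y 0 != 0)) (fun z => z) with
      | none => exact absurd ((PySem.List.min?_eq_none_iff _ _).mp hcase) (pv_filter_rows_ne_nil p p0 hh)
      | some t => exact ⟨t, rfl⟩
    obtain ⟨bottom, hmb⟩ : ∃ t, PySem.List.max? ((List.range 4).filter (fun y => (pvSmall p).getD y 0 != 0)) (fun z => z) = some t := by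
      cases hcase : PySem.List.max? ((List.range 4).filter (fun y => (pvSmall p).getD y 0 != 0)) (fun z => z) with
      | none => exact absurd ((PySem.List.max?_eq_none_iff _ _).mp hcase) (pv_filter_rows_ne_nil p p0 hh)
      | some t => exact ⟨t, rfl⟩
    obtain ⟨left, hml⟩ : ∃ t, PySem.List.min? ((List.range 4).filter (fun x => ((pvUnion (pvSmall p) >>> x) &&& 1 != 0))) (fun z => z) = some t := by
      cases hcase : PySem.List.min? ((List.range 4).filter (fun x => ((pvUnion (pvSmall p) >>> x) &&& 1 != 0))) (fun z => z) with
      | none => exact absurd ((PySem.List.min?_eq_none_iff _ _).mp hcase) (pv_filter_cols_ne_nil p p0 hh)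
      | some t => exact ⟨t, rfl⟩
    obtain ⟨right, hmr⟩ : ∃ t, PySem.List.max? ((List.range 4).filter (fun x => ((pvUnion (pvSmall p) >>> x) &&& 1 != 0))) (fun z => z) = some t := by
      cases hcase : PySem.List.max? ((List.range 4).filter (fun x => ((pvUnion (pvSmall p) >>> x) &&& 1 != 0))) (fun z => z) with
      | none => exact absurd ((PySem.List.max?_eq_none_iff _ _).mp hcase) (pv_filter_cols_ne_nil p p0 hh)
      | some t => exact ⟨t, rfl⟩
    obtain ⟨ht4, htE, htL⟩ := pv_rowMin p hmt
    obtain ⟨hb4, hbE, hbL⟩ := pv_rowMax p hmb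
    obtain ⟨hl4, hlE, hlL⟩ := pv_colMin p hml
    obtain ⟨hr4, hrE, hrL⟩ := pv_colMax p hmr
    have htb : top ≤ bottom := by
      obtain ⟨q, hq, hq1⟩ := htE
      have := hbL q hq
      omega
    have hlr : left ≤ right := by
      obtain ⟨q, hq, hq1⟩ := hlE
      have := hrL q hq
      omega
    simp only [insertion_puzzle, pv_debut_eq_head, hh, insertion_puzzle_alt, hmt, hmb, hml, hmr]
    refine if_congr ?_ rfl rfl
    rw [pv_LA_iff p g p0 hh,
      pv_propA_iff_propB p g p0 htE hbE hlE hrE,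
      ← pv_LB_iff p g hb4 hr4 htb hlr htL hbL hlL hrL]

-- ===== VERDICT (by name: the statement is the Claim_ definition above) =====
theorem insertion_puzzle_spec : Claim_equal_insertion_puzzle := by
  intro p g _ _
  unfold Spec_insertion_puzzle
  exact pv_main p g
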